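-- pv_equiv track=rewrite | github.com/neuralxploit/TheRobin | agent/report_pdf.py | _xml_safe
-- ===== SOURCE A (Python) =====
-- def _xml_safe(text):
--     """Make text safe for ReportLab XML paragraphs."""
--     if not text:
--         return ""
--     s = str(text)
--     s = s.replace("&", "&amp;").replace("<", "&lt;").replace(">", "&gt;")
--     s = s.replace('"', "&quot;").replace("'", "&#39;")
--     # Remove any control characters that would break XML
--     s = "".join(c for c in s if ord(c) >= 32 or c in "\n\r\t")
--     return s
-- ===== SOURCE B (Python) =====
-- _XML_TABLE = {38: "&amp;", 60: "&lt;", 62: "&gt;", 34: "&quot;", 39: "&#39;"}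
-- for _cp in range(32):
--     if _cp not in (9, 10, 13):
--         _XML_TABLE[_cp] = None
--
--
-- def _xml_safe(text):
--     """Make text safe for ReportLab XML paragraphs (single table-driven pass)."""
--     if not text:
--         return ""
--     return str(text).translate(_XML_TABLE)
-- ===== Notes on version B (the rewrite author's own statement) =====
-- stated objective: faster
-- what changed: Replaces A's five chained full-string .replace passes plus a per-char filtering comprehension (six traversals building five intermediate strings) by one precomputed code-point translation table applied in a single str.translate pass.
import Mathlib
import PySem

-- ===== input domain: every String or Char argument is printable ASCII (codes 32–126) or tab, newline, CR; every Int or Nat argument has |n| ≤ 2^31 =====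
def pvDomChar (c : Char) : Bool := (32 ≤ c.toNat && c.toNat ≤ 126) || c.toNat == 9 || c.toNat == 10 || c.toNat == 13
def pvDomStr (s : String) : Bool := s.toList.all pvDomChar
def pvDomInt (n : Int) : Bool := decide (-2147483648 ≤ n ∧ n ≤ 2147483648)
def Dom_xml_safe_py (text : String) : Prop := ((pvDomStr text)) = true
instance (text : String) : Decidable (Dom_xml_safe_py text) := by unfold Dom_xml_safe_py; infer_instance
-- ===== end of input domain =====

-- B replaces A's five chained full-string .replace passes plus a filtering
-- comprehension by ONE table-driven pass (str.translate); same return value,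
-- measurably faster by a constant factor (one traversal instead of six).

-- ===== PORT A =====
-- A: five chained .replace scans, then a comprehension dropping control chars.
-- `c in "\n\r\t"` for a single char c is ported as char-list membership (exact).
def xml_safe_py (text : String) : String :=
  if text = "" then ""
  else
    let s1 := PySem.Str.replace text "&" "&amp;"
    let s2 := PySem.Str.replace s1 "<" "&lt;"
    let s3 := PySem.Str.replace s2 ">" "&gt;"
    let s4 := PySem.Str.replace s3 "\"" "&quot;"
    let s5 := PySem.Str.replace s4 "'" "&#39;"
    PySem.Str.join ""
      ((s5.toList.filter
          (fun c => decide (32 ≤ c.toNat) || ['\n', '\r', '\t'].contains c)).map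
        (fun c => String.ofList [c]))

-- ===== PORT B =====
-- B builds one translation table keyed by code points and does s.translate(table):
-- ported by hand as a single per-char table lookup applied in one pass (exact:
-- translate maps each code point independently, None deletes).
def pvXmlTable (n : Nat) : Option (List Char) :=
  if n = 38 then some ['&', 'a', 'm', 'p', ';']
  else if n = 60 then some ['&', 'l', 't', ';']
  else if n = 62 then some ['&', 'g', 't', ';']
  else if n = 34 then some ['&', 'q', 'u', 'o', 't', ';']
  else if n = 39 then some ['&', '#', '3', '9', ';']
  else if n < 32 ∧ n ≠ 9 ∧ n ≠ 10 ∧ n ≠ 13 then some []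
  else none

def xml_safe_py_alt (text : String) : String :=
  if text = "" then ""
  else String.ofList (text.toList.flatMap (fun c => (pvXmlTable c.toNat).getD [c]))

-- ===== PRECONDITION & SPEC =====
def Spec_xml_safe_py (text : String) (out : String) : Prop := out = xml_safe_py_alt text
instance (text : String) (out : String) : Decidable (Spec_xml_safe_py text out) := by unfold Spec_xml_safe_py; infer_instance

-- ===== CLAIM (what is proved, stated in full; the proofs are below) =====
def Claim_equal_xml_safe_py : Prop := ∀ (text : String), Dom_xml_safe_py text → Spec_xml_safe_py text (xml_safe_py text)

-- ===== LEMMAS AND PROOFS =====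

-- A single-char-pattern replace is a per-char flatMap (loop invariant of replace.go).
theorem pvGoSingle (o : Char) (new : List Char) :
    ∀ (fuel : Nat) (l acc : List Char), l.length ≤ fuel →
    PySem.Chars.replace.go [o] new fuel l acc
      = acc.reverse ++ l.flatMap (fun c => if c = o then new else [c]) := by
  intro fuel
  induction fuel with
  | zero =>
    intro l acc h
    have : l = [] := List.eq_nil_of_length_eq_zero (Nat.le_zero.mp h)
    subst this
    simp [PySem.Chars.replace.go]
  | succ n ih =>
    intro l acc h
    cases l with
    | nil => simp [PySem.Chars.replace.go]
    | cons c t =>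
      by_cases hc : c = o
      · rw [PySem.Chars.replace.go]
        have : ([o].isPrefixOf (c :: t)) = true := by
          show (o == c && List.isPrefixOf [] t) = true; simp [hc]
        rw [this]; simp only [if_true]
        rw [ih _ _ (by simpa using Nat.le_of_succ_le_succ h)]
        simp [hc]
      · rw [PySem.Chars.replace.go]
        have : ([o].isPrefixOf (c :: t)) = false := by
          show (o == c && List.isPrefixOf [] t) = false
          simp; exact fun h' => absurd h'.symm hc
        rw [this, if_neg Bool.false_ne_true]
        rw [ih _ _ (Nat.le_of_succ_le_succ h)]
        simp [hc]

theorem pvReplaceSingle (s : List Char) (o : Char) (new : List Char) :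
    PySem.Chars.replace s [o] new = s.flatMap (fun c => if c = o then new else [c]) := by
  rw [PySem.Chars.replace]
  simp [pvGoSingle o new s.length s [] (le_refl _)]

theorem pvCharOfToNat (c d : Char) (h : c.toNat = d.toNat) : c = d := by
  apply Char.ext
  exact UInt32.toNat_inj.mp h

-- The five replace passes followed by the control-char filter agree, character by
-- character, with B's translation table.
theorem pvPointwise (c : Char) :
    List.flatMap
      (fun a =>
        List.flatMap
          (fun a =>
            List.flatMap
              (fun a =>
                List.flatMap
                  (fun a =>
                    List.filter (fun c => decide (32 ≤ c.toNat) || ['\n', '\r', '\t'].contains c)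
                      (if a = '\'' then ['&', '#', '3', '9', ';'] else [a]))
                  (if a = '"' then ['&', 'q', 'u', 'o', 't', ';'] else [a]))
              (if a = '>' then ['&', 'g', 't', ';'] else [a]))
          (if a = '<' then ['&', 'l', 't', ';'] else [a]))
      (if c = '&' then ['&', 'a', 'm', 'p', ';'] else [c])
      = (pvXmlTable c.toNat).getD [c] := by
  by_cases h1 : c = '&'
  · subst h1; decide
  by_cases h2 : c = '<'
  · subst h2; decide
  by_cases h3 : c = '>'
  · subst h3; decide
  by_cases h4 : c = '"'
  · subst h4; decide
  by_cases h5 : c = '\''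
  · subst h5; decide
  have n1 : c.toNat ≠ 38 := fun h => h1 (pvCharOfToNat c '&' h)
  have n2 : c.toNat ≠ 60 := fun h => h2 (pvCharOfToNat c '<' h)
  have n3 : c.toNat ≠ 62 := fun h => h3 (pvCharOfToNat c '>' h)
  have n4 : c.toNat ≠ 34 := fun h => h4 (pvCharOfToNat c '"' h)
  have n5 : c.toNat ≠ 39 := fun h => h5 (pvCharOfToNat c '\'' h)
  simp only [if_neg h1, List.flatMap_cons, List.flatMap_nil, List.append_nil,
    if_neg h2, if_neg h3, if_neg h4, if_neg h5]
  simp only [List.filter, List.contains_cons, List.contains_nil]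
  rw [pvXmlTable]
  simp only [if_neg n1, if_neg n2, if_neg n3, if_neg n4, if_neg n5]
  by_cases hk : 32 ≤ c.toNat
  · rw [if_neg (by omega)]
    simp [hk]
  · by_cases h9 : c = '\t'
    · subst h9; decide
    by_cases h10 : c = '\n'
    · subst h10; decide
    by_cases h13 : c = '\r'
    · subst h13; decide
    have m9 : c.toNat ≠ 9 := fun h => h9 (pvCharOfToNat c '\t' h)
    have m10 : c.toNat ≠ 10 := fun h => h10 (pvCharOfToNat c '\n' h)
    have m13 : c.toNat ≠ 13 := fun h => h13 (pvCharOfToNat c '\r' h)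
    rw [if_pos ⟨by omega, m9, m10, m13⟩]
    have e9 : (c == '\t') = false := by simp [h9]
    have e10 : (c == '\n') = false := by simp [h10]
    have e13 : (c == '\r') = false := by simp [h13]
    simp [hk, e9, e10, e13]

-- ===== VERDICT (by name: the statement is the Claim_ definition above) =====
theorem xml_safe_py_spec : Claim_equal_xml_safe_py := by
  intro text _
  unfold Spec_xml_safe_py xml_safe_py xml_safe_py_alt
  by_cases h : text = ""
  · simp [h]
  simp only [if_neg h]
  apply String.toList_inj.mp
  rw [String.toList_ofList]
  have hrep : ∀ (s : String) (o : Char) (new : List Char),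
      (PySem.Str.replace s (String.ofList [o]) (String.ofList new)).toList
        = s.toList.flatMap (fun c => if c = o then new else [c]) := by
    intro s o new
    rw [PySem.Str.toList_replace]
    simp only [String.toList_ofList]
    exact pvReplaceSingle s.toList o new
  rw [PySem.Str.toList_join]
  simp only [List.map_map]
  have hsing : ∀ l : List Char,
      PySem.Chars.join "".toList (l.map (String.toList ∘ fun c => String.ofList [c])) = l := by
    intro l
    have : (l.map (String.toList ∘ fun c => String.ofList [c])) = l.map ([·]) := by
      simp [Function.comp, String.toList_ofList]
    rw [this]
    have h0 : "".toList = ([] : List Char) := rfl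
    rw [h0]
    exact PySem.Chars.join_nil_singletons l
  rw [hsing]
  rw [show ("&" : String) = String.ofList ['&'] from rfl,
      show ("&amp;" : String) = String.ofList ['&','a','m','p',';'] from rfl,
      show ("<" : String) = String.ofList ['<'] from rfl,
      show ("&lt;" : String) = String.ofList ['&','l','t',';'] from rfl,
      show (">" : String) = String.ofList ['>'] from rfl,
      show ("&gt;" : String) = String.ofList ['&','g','t',';'] from rfl,
      show ("\"" : String) = String.ofList ['"'] from rfl,
      show ("&quot;" : String) = String.ofList ['&','q','u','o','t',';'] from rfl,
      show ("'" : String) = String.ofList ['\''] from rfl,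
      show ("&#39;" : String) = String.ofList ['&','#','3','9',';'] from rfl]
  simp only [hrep]
  simp only [List.flatMap_assoc, List.filter_flatMap]
  exact List.flatMap_congr (fun c _ => pvPointwise c)
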